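-- pv_equiv track=rewrite | github.com/aceventura82/rummi | rummiApp/games.py | replaceAllJokers
-- ===== SOURCE A (Python) =====
-- def replaceAllJokers(cardList):
--     # remove all initials joker
--     i = 0
--     jokersRemoved = 0
--     while i < len(cardList):
--         if cardList[i] == 'XX':
--             del cardList[i]
--             jokersRemoved += 1
--             i -= 1
--         else:
--             break
--         i += 1
--     # replace any other joker
--     while i < len(cardList):
--         if cardList[i] == "XX":
--             cardList[i] = replaceJokerFromPrevious(cardList[i-1])
--         i += 1
--     # append jokers again if any
--     for i in range(0, jokersRemoved):
--         cardList.insert(0, "XX")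
--     # find values for any initial joker
--     i = jokersRemoved-1
--     while i >= 0:
--         cardList[i] = replaceJokerFromNext(cardList[i+1])
--         i -= 1
--     return cardList
--
-- def replaceJokerFromPrevious(card):
--     if card[0:1] in '2345678':
--         return str(int(card[0:1])+1)+card[1:2]
--     if card[0:1] == '9':
--         return "0"+card[1:2]
--     if card[0:1] == '0':
--         return "J"+card[1:2]
--     if card[0:1] == 'J':
--         return "Q"+card[1:2]
--     if card[0:1] == 'Q':
--         return "K"+card[1:2]
--     if card[0:1] == 'K':
--         return "A"+card[1:2]
--     if card[0:1] == 'A':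
--         return "2"+card[1:2]
--
-- def replaceJokerFromNext(card):
--     if card[0:1] in '3456789':
--         return str(int(card[0:1])-1)+card[1:2]
--     if card[0:1] == '0':
--         return "9"+card[1:2]
--     if card[0:1] == 'J':
--         return "0"+card[1:2]
--     if card[0:1] == 'Q':
--         return "J"+card[1:2]
--     if card[0:1] == 'K':
--         return "Q"+card[1:2]
--     if card[0:1] == 'A':
--         return "K"+card[1:2]
--     if card[0:1] == '2':
--         return "A"+card[1:2]
-- ===== SOURCE B (Python) =====
-- ORDER = "234567890JQKA"  # card rank cycle
--
--
-- def shiftCard(card, d):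
--     # neighbouring rank in the cycle, keeping the suit character
--     return ORDER[(ORDER.index(card[0]) + d) % 13] + card[1:2]
--
--
-- def replaceAllJokers(cardList):
--     out = []
--     lead = 0          # jokers seen before the first real card
--     prev = None       # last card emitted
--     for card in cardList:
--         if card == 'XX':
--             if prev is None:
--                 lead += 1
--                 continue
--             card = shiftCard(prev, 1)
--         elif prev is None and lead:
--             # first real card: synthesise the leading jokers backwards from it
--             seed = card
--             pref = []
--             for _ in range(lead):
--                 seed = shiftCard(seed, -1)
--                 pref.append(seed)
--             pref.reverse()
--             out = pref
--         out.append(card)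
--         prev = card
--     cardList[:] = out
--     return cardList
-- ===== Notes on version B (the rewrite author's own statement) =====
-- stated objective: simpler
-- what changed: Replaces A's three-phase del/insert surgery with if-chain helpers by a single forward pass that counts leading jokers, forward-fills later jokers from the previous card and synthesises the leading prefix backwards from the first real card, with both rank steps computed as index arithmetic in one cyclic rank string.
-- outside the precondition, e.g. on replaceAllJokers(['hi', 'XX']): A returns ['hi', None], B raises ValueError
import Mathlib
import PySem

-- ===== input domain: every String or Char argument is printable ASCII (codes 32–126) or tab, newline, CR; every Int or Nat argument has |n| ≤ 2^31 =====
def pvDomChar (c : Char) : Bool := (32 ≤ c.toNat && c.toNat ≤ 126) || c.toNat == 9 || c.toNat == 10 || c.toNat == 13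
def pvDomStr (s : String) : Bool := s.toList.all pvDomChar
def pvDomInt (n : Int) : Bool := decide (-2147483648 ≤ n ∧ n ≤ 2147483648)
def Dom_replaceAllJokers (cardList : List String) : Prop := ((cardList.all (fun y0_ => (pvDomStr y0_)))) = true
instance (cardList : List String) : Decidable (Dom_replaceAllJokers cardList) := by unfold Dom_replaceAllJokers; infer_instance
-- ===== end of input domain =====

-- B replaces A's three-phase del/insert surgery (strip leading jokers, forward-fill, re-insert and
-- back-fill) by a single forward pass with a cyclic rank string; both A and B mutate the argument list
-- in place in Python — the equivalence proved here is about the returned value (which is also the final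
-- content of the list in both).


-- ===== PORT A =====

-- replaceJokerFromPrevious; the Python falls off the end returning None when the first character is
-- not a rank (and raises on int('') when card is empty) — those inputs are outside Pre_; "" stands in.
def fromPrevA (card : String) : String :=
  if PySem.Str.isIn (PySem.Str.slice card (some 0) (some 1)) "2345678" then
    PySem.Int.toStr ((PySem.Int.ofStr? (PySem.Str.slice card (some 0) (some 1))).getD 0 + 1) ++ PySem.Str.slice card (some 1) (some 2)
  else if PySem.Str.slice card (some 0) (some 1) = "9" then "0" ++ PySem.Str.slice card (some 1) (some 2)
  else if PySem.Str.slice card (some 0) (some 1) = "0" then "J" ++ PySem.Str.slice card (some 1) (some 2)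
  else if PySem.Str.slice card (some 0) (some 1) = "J" then "Q" ++ PySem.Str.slice card (some 1) (some 2)
  else if PySem.Str.slice card (some 0) (some 1) = "Q" then "K" ++ PySem.Str.slice card (some 1) (some 2)
  else if PySem.Str.slice card (some 0) (some 1) = "K" then "A" ++ PySem.Str.slice card (some 1) (some 2)
  else if PySem.Str.slice card (some 0) (some 1) = "A" then "2" ++ PySem.Str.slice card (some 1) (some 2)
  else ""

-- replaceJokerFromNext (same convention for the fall-off-the-end None)
def fromNextA (card : String) : String :=
  if PySem.Str.isIn (PySem.Str.slice card (some 0) (some 1)) "3456789" then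
    PySem.Int.toStr ((PySem.Int.ofStr? (PySem.Str.slice card (some 0) (some 1))).getD 0 - 1) ++ PySem.Str.slice card (some 1) (some 2)
  else if PySem.Str.slice card (some 0) (some 1) = "0" then "9" ++ PySem.Str.slice card (some 1) (some 2)
  else if PySem.Str.slice card (some 0) (some 1) = "J" then "0" ++ PySem.Str.slice card (some 1) (some 2)
  else if PySem.Str.slice card (some 0) (some 1) = "Q" then "J" ++ PySem.Str.slice card (some 1) (some 2)
  else if PySem.Str.slice card (some 0) (some 1) = "K" then "Q" ++ PySem.Str.slice card (some 1) (some 2)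
  else if PySem.Str.slice card (some 0) (some 1) = "A" then "K" ++ PySem.Str.slice card (some 1) (some 2)
  else if PySem.Str.slice card (some 0) (some 1) = "2" then "A" ++ PySem.Str.slice card (some 1) (some 2)
  else ""

-- first while loop: delete leading 'XX' entries, counting them (jokersRemoved)
def stripA : List String → List String × Nat
  | [] => ([], 0)
  | x :: xs => if x = "XX" then let r := stripA xs; (r.1, r.2 + 1) else (x :: xs, 0)

-- second while loop: i walks forward; cardList[i-1] is the carried previous element
-- (the seed "" is never read: after stripA the first element is not 'XX')
def fwdA (prev : String) : List String → List String
  | [] => []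
  | x :: xs => if x = "XX" then fromPrevA prev :: fwdA (fromPrevA prev) xs
               else x :: fwdA x xs

-- insert-jokers loop + backward while loop: position i gets replaceJokerFromNext(cardList[i+1])
def backA : Nat → String → List String → List String
  | 0, _, m => m
  | n + 1, seed, m => backA n (fromNextA seed) (fromNextA seed :: m)

def replaceAllJokers (cardList : List String) : List String :=
  let p := stripA cardList
  let m := fwdA "" p.1
  -- Python reads cardList[i+1] = m[0] to seed the backward loop (IndexError when m = [] and
  -- jokersRemoved > 0 — outside Pre_; headD "" stands in)
  backA p.2 (m.headD "") m

-- ===== PORT B =====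

-- ORDER = "234567890JQKA", indexed as characters
def pvOrder : List Char := ['2', '3', '4', '5', '6', '7', '8', '9', '0', 'J', 'Q', 'K', 'A']

-- shiftCard(card, d) = ORDER[(ORDER.index(card[0]) + d) % 13] + card[1:2]
-- (card[0] on "" is an IndexError, ORDER.index a ValueError when absent — outside Pre_; defaults stand in)
def shiftCard (card : String) (d : Int) : String :=
  let c := (PySem.Str.pyGet? card 0).getD ' '
  let i : Int := ((PySem.List.index? pvOrder c).getD 0 : Nat)
  String.ofList (pvOrder.getD (PySem.Int.mod (i + d) 13).toNat '?' :: (PySem.Str.slice card (some 1) (some 2)).toList)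

-- the seed loop: for _ in range(lead): seed = shiftCard(seed, -1); pref.append(seed)
def prefLoop : Nat → String → List String → List String
  | 0, _, pref => pref
  | n + 1, seed, pref => prefLoop n (shiftCard seed (-1)) (pref ++ [shiftCard seed (-1)])

def mkPref (lead : Nat) (card : String) : List String := (prefLoop lead card []).reverse

-- one iteration of B's single for-loop; state = (out, lead, prev)
def stepB (st : List String × Nat × Option String) (card : String) : List String × Nat × Option String :=
  if card = "XX" then
    match st.2.2 with
    | none => (st.1, st.2.1 + 1, none)
    | some p => (st.1 ++ [shiftCard p 1], st.2.1, some (shiftCard p 1))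
  else
    match st.2.2 with
    | none =>
        if st.2.1 ≠ 0 then (mkPref st.2.1 card ++ [card], st.2.1, some card)
        else (st.1 ++ [card], st.2.1, some card)
    | some _ => (st.1 ++ [card], st.2.1, some card)

def replaceAllJokers_alt (cardList : List String) : List String :=
  (cardList.foldl stepB ([], 0, none)).1

-- ===== PRECONDITION & SPEC =====

-- a string whose first character is a rank of the cycle (a valid seed for a joker)
def validCard (s : String) : Bool :=
  match s.toList with
  | [] => false
  | c :: _ => pvOrder.contains c

-- scan after the first real card: v is the validity of the nearest non-joker to the left
def preScan : Bool → List String → Bool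
  | _, [] => true
  | v, x :: xs => if x = "XX" then v && preScan v xs else preScan (validCard x) xs

-- leading-joker segment: the first real card must exist and be valid
def preAux : List String → Bool
  | [] => false
  | x :: xs => if x = "XX" then preAux xs else validCard x && preScan (validCard x) xs

def preB : List String → Bool
  | [] => true
  | x :: xs => if x = "XX" then preAux (x :: xs) else preScan (validCard x) xs

-- Pre_ excludes exactly the inputs where A raises (ValueError/TypeError on an empty-string seed,
-- IndexError on an all-joker list) or where A's returned list contains None — not a string — because
-- some joker's nearest non-joker neighbour (previous non-joker, or for leading jokers the first real
-- card) is not a valid card.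
def Pre_replaceAllJokers (cardList : List String) : Prop := preB cardList = true
instance (cardList : List String) : Decidable (Pre_replaceAllJokers cardList) := by
  unfold Pre_replaceAllJokers; infer_instance

def pvWitness_replaceAllJokers : List String := ["XX", "5D", "XX", "XX", "8S", "XX"]

def Spec_replaceAllJokers (cardList : List String) (out : List String) : Prop := out = replaceAllJokers_alt cardList
instance (cardList : List String) (out : List String) : Decidable (Spec_replaceAllJokers cardList out) := by unfold Spec_replaceAllJokers; infer_instance

-- ===== CLAIM (what is proved, stated in full; the proofs are below) =====
def Claim_equal_replaceAllJokers : Prop := ∀ (cardList : List String), Dom_replaceAllJokers cardList → Pre_replaceAllJokers cardList → Spec_replaceAllJokers cardList (replaceAllJokers cardList)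


-- ===== LEMMAS AND PROOFS =====

-- the two rank tables agree: under a valid seed, A's if-chains compute exactly B's cyclic shift
theorem fromPrevA_eq_shift (s : String) (h : validCard s = true) : fromPrevA s = shiftCard s 1 := by
  cases hsl : s.toList with
  | nil => simp [validCard, hsl] at h
  | cons c t =>
    have hc : pvOrder.contains c = true := by simpa [validCard, hsl] using h
    have h01 : PySem.Str.slice s (some 0) (some 1) = String.ofList [c] := by
      apply String.ext; simp [pysem, hsl]
    have hg0 : PySem.Str.pyGet? s 0 = some c := by simp [pysem, hsl]
    simp [pvOrder] at hc
    rcases hc with rfl|rfl|rfl|rfl|rfl|rfl|rfl|rfl|rfl|rfl|rfl|rfl|rfl <;>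
      (apply String.ext;
       simp only [fromPrevA, shiftCard, h01, hg0];
       repeat (first | rw [if_pos (by decide)] | rw [if_neg (by decide)])) <;>
      (first | decide | (norm_num <;> (first | decide | simp)) | simp) <;>
      (first
        | decide
        | simp
        | (rw [← List.singleton_append];
           exact congrArg (fun z => z ++ PySem.List.slice s.toList (some 1) (some 2)) (by decide)))

theorem fromNextA_eq_shift (s : String) (h : validCard s = true) : fromNextA s = shiftCard s (-1) := by
  cases hsl : s.toList with
  | nil => simp [validCard, hsl] at h
  | cons c t =>
    have hc : pvOrder.contains c = true := by simpa [validCard, hsl] using h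
    have h01 : PySem.Str.slice s (some 0) (some 1) = String.ofList [c] := by
      apply String.ext; simp [pysem, hsl]
    have hg0 : PySem.Str.pyGet? s 0 = some c := by simp [pysem, hsl]
    simp [pvOrder] at hc
    rcases hc with rfl|rfl|rfl|rfl|rfl|rfl|rfl|rfl|rfl|rfl|rfl|rfl|rfl <;>
      (apply String.ext;
       simp only [fromNextA, shiftCard, h01, hg0];
       repeat (first | rw [if_pos (by decide)] | rw [if_neg (by decide)])) <;>
      (first | decide | (norm_num <;> (first | decide | simp)) | simp) <;>
      (first
        | decide
        | simp
        | (rw [← List.singleton_append];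
           exact congrArg (fun z => z ++ PySem.List.slice s.toList (some 1) (some 2)) (by decide)))

theorem validCard_shift1 (s : String) (h : validCard s = true) :
    validCard (shiftCard s 1) = true := by
  cases hsl : s.toList with
  | nil => simp [validCard, hsl] at h
  | cons c t =>
    have hc : pvOrder.contains c = true := by simpa [validCard, hsl] using h
    have hg0' : PySem.List.pyGet? s.toList 0 = some c := by
      simp [hsl]
    simp [pvOrder] at hc
    rcases hc with rfl|rfl|rfl|rfl|rfl|rfl|rfl|rfl|rfl|rfl|rfl|rfl|rfl <;>
      (simp [validCard, shiftCard, hg0']; decide)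

theorem validCard_shiftNeg1 (s : String) (h : validCard s = true) :
    validCard (shiftCard s (-1)) = true := by
  cases hsl : s.toList with
  | nil => simp [validCard, hsl] at h
  | cons c t =>
    have hc : pvOrder.contains c = true := by simpa [validCard, hsl] using h
    have hg0' : PySem.List.pyGet? s.toList 0 = some c := by
      simp [hsl]
    simp [pvOrder] at hc
    rcases hc with rfl|rfl|rfl|rfl|rfl|rfl|rfl|rfl|rfl|rfl|rfl|rfl|rfl <;>
      (simp [validCard, shiftCard, hg0']; decide)

-- chainOk p ys: every joker of ys is seeded (through the replacement chain) by a valid card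
def chainOk : String → List String → Prop
  | _, [] => True
  | p, x :: xs => if x = "XX" then validCard p = true ∧ chainOk (shiftCard p 1) xs
                  else chainOk x xs

theorem preScan_chainOk (ys : List String) : ∀ p : String, preScan (validCard p) ys = true → chainOk p ys := by
  induction ys with
  | nil => intro p _; trivial
  | cons x xs ih =>
    intro p h
    by_cases hx : x = "XX"
    · subst hx
      have h' : validCard p = true ∧ preScan (validCard p) xs = true := by
        simpa [preScan] using h
      have : chainOk (shiftCard p 1) xs := by
        apply ih
        rw [validCard_shift1 p h'.1]
        rw [h'.1] at h'
        exact h'.2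
      simp [chainOk, h'.1, this]
    · have h' : preScan (validCard x) xs = true := by simpa [preScan, hx] using h
      simpa [chainOk, hx] using ih x h'

-- B's fold after the first real card emits exactly A's forward-filled tail
theorem foldB_fwd (ys : List String) : ∀ (p : String) (out : List String) (lead : Nat),
    chainOk p ys → (ys.foldl stepB (out, lead, some p)).1 = out ++ fwdA p ys := by
  induction ys with
  | nil => intro p out lead _; simp [fwdA]
  | cons x xs ih =>
    intro p out lead hc
    by_cases hx : x = "XX"
    · subst hx
      have hc' : validCard p = true ∧ chainOk (shiftCard p 1) xs := by
        simpa [chainOk] using hc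
      have hstep : stepB (out, lead, some p) "XX" = (out ++ [shiftCard p 1], lead, some (shiftCard p 1)) := by
        simp [stepB]
      rw [List.foldl_cons, hstep, ih _ _ _ hc'.2]
      simp [fwdA, fromPrevA_eq_shift p hc'.1]
    · have hc' : chainOk x xs := by simpa [chainOk, hx] using hc
      have hstep : stepB (out, lead, some p) x = (out ++ [x], lead, some x) := by
        simp [stepB, hx]
      rw [List.foldl_cons, hstep, ih _ _ _ hc']
      simp [fwdA, hx]

-- B's fold over the leading jokers only counts them
theorem foldB_lead (k : Nat) : ∀ (ys : List String) (out : List String) (lead : Nat),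
    (List.replicate k "XX" ++ ys).foldl stepB (out, lead, none) = ys.foldl stepB (out, lead + k, none) := by
  induction k with
  | zero => intro ys out lead; simp
  | succ n ih =>
    intro ys out lead
    have hstep : stepB (out, lead, none) "XX" = (out, lead + 1, none) := by simp [stepB]
    rw [List.replicate_succ, List.cons_append, List.foldl_cons, hstep, ih]
    ring_nf

theorem prefLoop_append (n : Nat) : ∀ (s : String) (pref : List String),
    prefLoop n s pref = pref ++ prefLoop n s [] := by
  induction n with
  | zero => intro s pref; simp [prefLoop]
  | succ m ih =>
    intro s pref
    rw [prefLoop, prefLoop, ih (shiftCard s (-1)) (pref ++ [shiftCard s (-1)]),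
        ih (shiftCard s (-1)) ([] ++ [shiftCard s (-1)])]
    simp

-- A's backward fill of the re-inserted jokers is B's reversed seed loop
theorem backA_eq_mkPref (k : Nat) : ∀ (c : String) (m : List String), validCard c = true →
    backA k c m = mkPref k c ++ m := by
  induction k with
  | zero => intro c m _; simp [backA, mkPref, prefLoop]
  | succ n ih =>
    intro c m hv
    have hnext : fromNextA c = shiftCard c (-1) := fromNextA_eq_shift c hv
    have hv' : validCard (shiftCard c (-1)) = true := validCard_shiftNeg1 c hv
    have hpref : mkPref (n + 1) c = mkPref n (shiftCard c (-1)) ++ [shiftCard c (-1)] := by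
      rw [mkPref, prefLoop, prefLoop_append n (shiftCard c (-1)) ([] ++ [shiftCard c (-1)])]
      simp [mkPref]
    rw [backA, hnext, ih (shiftCard c (-1)) (shiftCard c (-1) :: m) hv', hpref]
    simp

theorem stripA_replicate (k : Nat) (m : List String) (hm : m = [] ∨ m.headD "" ≠ "XX") :
    stripA (List.replicate k "XX" ++ m) = (m, k) := by
  induction k with
  | zero =>
    rcases hm with rfl | hm
    · simp [stripA]
    · cases m with
      | nil => simp [stripA]
      | cons a as => simp only [List.headD_cons] at hm; simp [stripA, hm]
  | succ n ih => rw [List.replicate_succ, List.cons_append]; simp [stripA, ih]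

theorem decomp (l : List String) :
    ∃ k m, l = List.replicate k "XX" ++ m ∧ (m = [] ∨ m.headD "" ≠ "XX") := by
  induction l with
  | nil => exact ⟨0, [], rfl, Or.inl rfl⟩
  | cons x xs ih =>
    by_cases hx : x = "XX"
    · obtain ⟨k, m, hm, hh⟩ := ih
      exact ⟨k + 1, m, by simp [hx, hm, List.replicate_succ], hh⟩
    · exact ⟨0, x :: xs, rfl, Or.inr (by simpa using hx)⟩

theorem preAux_replicate (k : Nat) (m : List String) :
    preAux (List.replicate k "XX" ++ m) = preAux m := by
  induction k with
  | zero => simp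
  | succ n ih => rw [List.replicate_succ, List.cons_append]; simp [preAux, ih]

-- ===== VERDICT (by name: the statement is the Claim_ definition above) =====
theorem replaceAllJokers_spec : Claim_equal_replaceAllJokers := by
  intro l _ hpre
  unfold Spec_replaceAllJokers
  obtain ⟨k, m, rfl, hm⟩ := decomp l
  cases m with
  | nil =>
    cases k with
    | zero => decide
    | succ n =>
      exfalso
      have : preAux (List.replicate (n + 1) "XX" ++ ([] : List String)) = true := by
        have := hpre
        rw [Pre_replaceAllJokers, List.replicate_succ, List.cons_append, preB] at this
        simpa [List.replicate_succ, List.cons_append, preAux] using this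
      rw [preAux_replicate] at this
      simp [preAux] at this
  | cons c rest =>
    have hc : c ≠ "XX" := by
      rcases hm with h | h
      · exact absurd h (by simp)
      · simpa using h
    -- the precondition facts
    have hscan : preScan (validCard c) rest = true := by
      cases k with
      | zero =>
        have := hpre
        rwa [Pre_replaceAllJokers, List.replicate, List.nil_append, preB, if_neg hc] at this
      | succ n =>
        have := hpre
        rw [Pre_replaceAllJokers, List.replicate_succ, List.cons_append, preB, if_pos rfl,
            ← List.cons_append, ← List.replicate_succ, preAux_replicate] at this
        simp only [preAux, if_neg hc, Bool.and_eq_true] at this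
        exact this.2
    have hvalid : k ≠ 0 → validCard c = true := by
      intro hk
      cases k with
      | zero => exact absurd rfl hk
      | succ n =>
        have := hpre
        rw [Pre_replaceAllJokers, List.replicate_succ, List.cons_append, preB, if_pos rfl,
            ← List.cons_append, ← List.replicate_succ, preAux_replicate] at this
        simp only [preAux, if_neg hc, Bool.and_eq_true] at this
        exact this.1
    have hchain : chainOk c rest := preScan_chainOk rest c hscan
    -- the A side
    have hA : replaceAllJokers (List.replicate k "XX" ++ c :: rest) =
        backA k c (c :: fwdA c rest) := by
      rw [replaceAllJokers, stripA_replicate k (c :: rest) hm]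
      simp [fwdA, hc]
    -- the B side
    have hB : replaceAllJokers_alt (List.replicate k "XX" ++ c :: rest) =
        (if k ≠ 0 then mkPref k c ++ [c] else [c]) ++ fwdA c rest := by
      rw [replaceAllJokers_alt, foldB_lead k (c :: rest) [] 0, List.foldl_cons]
      by_cases hk : k ≠ 0
      · have hstep : stepB ([], 0 + k, none) c = (mkPref k c ++ [c], k, some c) := by
          simp [stepB, hc, hk]
        rw [hstep, foldB_fwd rest c (mkPref k c ++ [c]) k hchain]
        simp [hk]
      · have hk0 : k = 0 := by omega
        subst hk0
        have hstep : stepB ([], 0 + 0, none) c = ([c], 0, some c) := by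
          simp [stepB, hc]
        rw [hstep, foldB_fwd rest c [c] 0 hchain]
        simp
    rw [hA, hB]
    by_cases hk : k ≠ 0
    · rw [backA_eq_mkPref k c (c :: fwdA c rest) (hvalid hk), if_pos hk]
      simp
    · have hk0 : k = 0 := by omega
      subst hk0
      simp [backA]
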